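-- pv_equiv track=rewrite | github.com/STEMMOM/adk-decade-of-agents | tests/test_p01_actor_invariants.py | _latest_run_events
-- ===== SOURCE A (Python) =====
-- def _latest_run_events(events):
--     """
--     Only check the latest run (identified by the last runtime/system boot).
--     This avoids legacy pollution.
--     """
--     boot_indices = [
--         i for i, e in enumerate(events)
--         if e.get("event_type") in ("system.boot", "runtime.boot")
--     ]
--     if not boot_indices:
--         return []
--
--     start = boot_indices[-1]
--     return events[start:]
-- ===== SOURCE B (Python) =====
-- def _latest_run_events(events):
--     for i in range(len(events) - 1, -1, -1):
--         if events[i].get("event_type") in ("system.boot", "runtime.boot"):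
--             return events[i:]
--     return []
-- ===== Notes on version B (the rewrite author's own statement) =====
-- stated objective: simpler
-- what changed: Instead of collecting every boot index with enumerate and slicing from the last one, B scans indices backward from the end and returns events[i:] at the first boot marker it meets, keeping no collection at all.
import Mathlib
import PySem

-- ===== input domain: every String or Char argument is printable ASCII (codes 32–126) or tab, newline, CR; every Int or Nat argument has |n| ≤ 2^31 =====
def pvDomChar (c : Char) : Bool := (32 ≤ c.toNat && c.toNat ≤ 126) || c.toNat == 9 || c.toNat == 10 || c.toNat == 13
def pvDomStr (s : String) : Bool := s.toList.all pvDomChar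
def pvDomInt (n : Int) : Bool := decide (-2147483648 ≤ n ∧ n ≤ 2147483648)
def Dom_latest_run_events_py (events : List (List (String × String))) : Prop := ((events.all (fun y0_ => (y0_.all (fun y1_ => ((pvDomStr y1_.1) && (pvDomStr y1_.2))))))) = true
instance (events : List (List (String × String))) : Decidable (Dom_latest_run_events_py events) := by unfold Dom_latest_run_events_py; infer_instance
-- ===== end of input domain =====

-- B replaces A's "collect all boot indices, slice from the last" by a backward scan
-- that returns events[i:] at the first boot marker seen from the end (objective: simpler).

-- shared helper: e.get("event_type") in ("system.boot", "runtime.boot")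
def pvIsBoot (e : List (String × String)) : Bool :=
  match (PySem.Dict.ofList e).get? "event_type" with
  | some v => v == "system.boot" || v == "runtime.boot"
  | none => false

-- ===== PORT A =====
def latest_run_events_py (events : List (List (String × String))) : List (List (String × String)) :=
  let boot_indices := ((PySem.List.enumerate events 0).filter (fun p => pvIsBoot p.2)).map (·.1)
  -- 'if not boot_indices: return []' then 'boot_indices[-1]': pyGet? (-1) is none exactly on the empty list
  match PySem.List.pyGet? boot_indices (-1) with
  | none => []
  | some start => PySem.List.slice events (some start) none

-- ===== PORT B =====
-- the backward loop 'for i in range(len(events)-1, -1, -1)' with early return, as countdown recursion;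
-- events[i] is always in range here, ported as getD
def pvScanBack (events : List (List (String × String))) : Nat → List (List (String × String))
  | 0 => []
  | i + 1 => if pvIsBoot (events.getD i []) then events.drop i else pvScanBack events i

def latest_run_events_py_alt (events : List (List (String × String))) : List (List (String × String)) :=
  pvScanBack events events.length

-- ===== PRECONDITION & SPEC =====
def Spec_latest_run_events_py (events : List (List (String × String))) (out : List (List (String × String))) : Prop := out = latest_run_events_py_alt events
instance (events : List (List (String × String))) (out : List (List (String × String))) : Decidable (Spec_latest_run_events_py events out) := by unfold Spec_latest_run_events_py; infer_instance

-- ===== CLAIM (what is proved, stated in full; the proofs are below) =====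
def Claim_equal_latest_run_events_py : Prop := ∀ (events : List (List (String × String))), Dom_latest_run_events_py events → Spec_latest_run_events_py events (latest_run_events_py events)

-- ===== LEMMAS AND PROOFS =====

-- B computes: find the first boot index from the end of range n, drop there
theorem pvScanBack_char (events : List (List (String × String))) (n : Nat) :
    pvScanBack events n =
      match (List.range n).reverse.find? (fun i => pvIsBoot (events.getD i [])) with
      | none => []
      | some i => events.drop i := by
  induction n with
  | zero => rfl
  | succ n ih =>
    rw [List.range_succ, List.reverse_append]
    by_cases h : pvIsBoot (events[n]?.getD []) <;>
      simp [pvScanBack, h, ih]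

-- last kept element of a filter = first match scanning the reverse
theorem getLast?_filter_eq_find?_reverse {α : Type} (p : α → Bool) (l : List α) :
    (l.filter p).getLast? = l.reverse.find? p := by
  induction l using List.reverseRecOn with
  | nil => rfl
  | append_singleton l x ih =>
    by_cases h : p x <;>
      simp [List.filter_append, List.reverse_append, h, ih]

-- A computes: the last boot index of range n, drop there
theorem latest_run_events_py_char (events : List (List (String × String))) :
    latest_run_events_py events =
      match ((List.range events.length).filter (fun i => pvIsBoot (events.getD i []))).getLast? with
      | none => []
      | some i => events.drop i := by
  unfold latest_run_events_py
  rw [PySem.List.enumerate_eq_map_pyRange (d := ([] : List (String × String))),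
      PySem.List.pyRange_one]
  simp only [PySem.List.len_eq, Int.sub_zero, Int.toNat_natCast, Int.zero_add,
    List.filter_map, List.map_map, PySem.List.pyGet?_neg_one, List.getLast?_map,
    Function.comp_def, PySem.List.pyGetD_natCast]
  cases hl : ((List.range events.length).filter (fun i => pvIsBoot (events.getD i []))).getLast? with
  | none => simp
  | some i =>
    simp only [Option.map_some]
    exact PySem.List.slice_from_natCast events i

-- ===== VERDICT (by name: the statement is the Claim_ definition above) =====
theorem latest_run_events_py_spec : Claim_equal_latest_run_events_py := by
  intro events _
  show latest_run_events_py events = latest_run_events_py_alt events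
  rw [latest_run_events_py_char, latest_run_events_py_alt, pvScanBack_char,
    getLast?_filter_eq_find?_reverse]
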